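-- pv_equiv track=rewrite | github.com/smith-special-collections/a2c-tools | move_location_creator/ca_move_spreadsheet_maker.py | chunk_ids
-- ===== SOURCE A (Python) =====
-- def chunk_ids(id_list):
-- 	ids = []
-- 	if len(id_list) > 25:
-- 		id_chunks = [id_list[uri:uri + 25] for uri in range(0, len(id_list), 25)]
-- 		for chunk in id_chunks:
-- 			chunk = [str(i) for i in chunk]
-- 			chunk = ','.join(chunk)
-- 			ids.append(chunk)
-- 	else:
-- 		id_list = [str(i) for i in id_list]
-- 		id_list = ','.join(id_list)
-- 		ids.append(id_list)
--
-- 	return ids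
-- ===== SOURCE B (Python) =====
-- def chunk_ids(id_list):
--     results = []
--     buf = []
--     for i in id_list:
--         buf.append(str(i))
--         if len(buf) == 25:
--             results.append(','.join(buf))
--             buf = []
--     if buf or not results:
--         results.append(','.join(buf))
--     return results
-- ===== Notes on version B (the rewrite author's own statement) =====
-- stated objective: simpler
-- what changed: Replaces the length branch plus slice-comprehension chunking with a single buffer-based pass that flushes every 25 elements, with one final flush when the buffer is non-empty or nothing was emitted.
import Mathlib
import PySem

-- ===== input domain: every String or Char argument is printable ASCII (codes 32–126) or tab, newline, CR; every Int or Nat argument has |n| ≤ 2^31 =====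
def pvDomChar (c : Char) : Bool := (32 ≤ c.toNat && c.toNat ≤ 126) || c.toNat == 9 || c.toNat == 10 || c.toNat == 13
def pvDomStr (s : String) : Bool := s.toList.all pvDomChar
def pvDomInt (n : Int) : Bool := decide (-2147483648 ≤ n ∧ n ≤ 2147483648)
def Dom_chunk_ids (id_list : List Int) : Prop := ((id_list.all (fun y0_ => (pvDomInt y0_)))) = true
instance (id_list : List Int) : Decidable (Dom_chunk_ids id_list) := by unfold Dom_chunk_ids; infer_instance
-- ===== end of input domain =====

-- B replaces A's length branch plus slice-comprehension chunking with a single buffer-based pass (objective: simpler; same cost).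

-- ===== PORT A =====
def chunk_ids (id_list : List Int) : List String :=
  if 25 < id_list.length then
    let id_chunks :=
      (PySem.List.pyRange 0 (id_list.length : Int) 25).map
        (fun uri => PySem.List.slice id_list (some uri) (some (uri + 25)))
    id_chunks.foldl
      (fun ids chunk => ids ++ [PySem.Str.join "," (chunk.map PySem.Int.toStr)]) []
  else
    [PySem.Str.join "," (id_list.map PySem.Int.toStr)]

-- ===== PORT B =====
def chunk_ids_alt (id_list : List Int) : List String :=
  let st := id_list.foldl
    (fun (st : List String × List String) i =>
      let buf := st.2 ++ [PySem.Int.toStr i]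
      if buf.length = 25 then (st.1 ++ [PySem.Str.join "," buf], [])
      else (st.1, buf))
    ([], [])
  if st.2 ≠ [] ∨ st.1 = [] then st.1 ++ [PySem.Str.join "," st.2] else st.1

-- ===== PRECONDITION & SPEC =====
def Spec_chunk_ids (id_list : List Int) (out : List String) : Prop := out = chunk_ids_alt id_list
instance (id_list : List Int) (out : List String) : Decidable (Spec_chunk_ids id_list out) := by unfold Spec_chunk_ids; infer_instance

-- ===== CLAIM (what is proved, stated in full; the proofs are below) =====
def Claim_equal_chunk_ids : Prop := ∀ (id_list : List Int), Dom_chunk_ids id_list → Spec_chunk_ids id_list (chunk_ids id_list)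

-- ===== LEMMAS AND PROOFS =====


lemma pyRange25_cons (a b : Int) (h : a < b) :
    PySem.List.pyRange a b 25 = a :: PySem.List.pyRange (a+25) b 25 := by
  rw [PySem.List.pyRange_of_pos a b (by norm_num), PySem.List.pyRange_of_pos (a+25) b (by norm_num)]
  rw [if_pos h]
  by_cases h2 : a + 25 < b
  · rw [if_pos h2]
    have hc : ((b - a + 25 - 1) / 25).toNat = ((b - (a+25) + 25 - 1) / 25).toNat + 1 := by
      omega
    rw [hc, List.range_succ_eq_map]
    simp [List.map_map, Function.comp]
    intro k _; ring
  · rw [if_neg h2]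
    have hc : ((b - a + 25 - 1) / 25).toNat = 1 := by omega
    rw [hc]
    simp

def g25 (ts : List String) : List String :=
  if ts.length ≤ 25 then [PySem.Str.join "," ts]
  else PySem.Str.join "," (ts.take 25) :: g25 (ts.drop 25)
termination_by ts.length
decreasing_by simp; omega

lemma pyRange25_nil (a b : Int) (h : b ≤ a) : PySem.List.pyRange a b 25 = [] := by
  rw [PySem.List.pyRange_of_pos a b (by norm_num), if_neg (by omega)]
  simp

lemma pyRange25_shift (b : Int) :
    PySem.List.pyRange 25 b 25 = (PySem.List.pyRange 0 (b-25) 25).map (· + 25) := by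
  rw [PySem.List.pyRange_of_pos 25 b (by norm_num),
      PySem.List.pyRange_of_pos 0 (b-25) (by norm_num)]
  by_cases h : (25:Int) < b
  · rw [if_pos h, if_pos (by omega)]
    have hc : (b - 25 + 25 - 1) / 25 = (b - 25 - 0 + 25 - 1) / 25 := by omega
    rw [hc]
    simp [List.map_map, Function.comp]
    intro k _; ring
  · rw [if_neg h, if_neg (by omega)]; simp

lemma slice0_take25 (ts : List String) :
    PySem.List.slice ts (some 0) (some (0 + 25)) = ts.take 25 := by
  rw [PySem.List.slice_toNat ts (by norm_num) (by norm_num)]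
  simp

lemma mapForm_eq_g25 (k : Nat) : ∀ (ts : List String), ts.length ≤ k → ts ≠ [] →
    (PySem.List.pyRange 0 (ts.length : Int) 25).map
      (fun u => PySem.Str.join "," (PySem.List.slice ts (some u) (some (u + 25)))) = g25 ts := by
  induction k with
  | zero => intro ts h hne; simp at h; simp [h] at hne
  | succ k ih =>
    intro ts hlen hne
    have hpos : 0 < ts.length := List.length_pos_iff.mpr hne
    rw [pyRange25_cons 0 (ts.length : Int) (by exact_mod_cast hpos)]
    rw [List.map_cons, slice0_take25]
    have h025 : (0:Int) + 25 = 25 := by norm_num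
    rw [h025]
    by_cases h25 : ts.length ≤ 25
    · rw [pyRange25_nil 25 (ts.length : Int) (by exact_mod_cast h25)]
      rw [g25, if_pos h25, List.take_of_length_le h25]
      simp
    · rw [g25, if_neg h25]
      have hd : ((ts.drop 25).length : Int) = (ts.length : Int) - 25 := by
        simp; omega
      congr 1
      rw [pyRange25_shift, List.map_map]
      have step : ∀ u ∈ PySem.List.pyRange 0 ((ts.length : Int) - 25) 25,
          ((fun u => PySem.Str.join "," (PySem.List.slice ts (some u) (some (u + 25)))) ∘ (· + 25)) u
          = PySem.Str.join "," (PySem.List.slice (ts.drop 25) (some u) (some (u + 25))) := by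
        intro u hu
        have hu0 : 0 ≤ u := by
          have := (PySem.List.mem_pyRange_iff_of_pos (a := 0) (b := (ts.length : Int) - 25) (s := 25) (by norm_num) u).mp hu
          omega
        simp only [Function.comp]
        rw [show u + 25 + 25 = u + 50 from by ring]
        rw [PySem.List.slice_toNat ts (by omega) (by omega),
            PySem.List.slice_toNat (ts.drop 25) hu0 (by omega),
            List.drop_drop,
            show (u + 50).toNat - (u + 25).toNat = 25 from by omega,
            show (u + 25).toNat - u.toNat = 25 from by omega,
            show 25 + u.toNat = (u + 25).toNat from by omega]
      rw [List.map_congr_left step, ← hd]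
      exact ih (ts.drop 25) (by simp only [List.length_drop]; omega) (by
        intro hnil
        have := congrArg List.length hnil
        simp at this
        omega)

def emitRem (c : List String) : List String × List String :=
  if c.length < 25 then ([], c)
  else
    let p := emitRem (c.drop 25)
    (PySem.Str.join "," (c.take 25) :: p.1, p.2)
termination_by c.length
decreasing_by simp; omega

def stepB (st : List String × List String) (s : String) : List String × List String :=
  let buf := st.2 ++ [s]
  if buf.length = 25 then (st.1 ++ [PySem.Str.join "," buf], []) else (st.1, buf)

lemma foldB_inv : ∀ (ts : List String) (res buf : List String), buf.length < 25 →
    ts.foldl stepB (res, buf)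
      = (res ++ (emitRem (buf ++ ts)).1, (emitRem (buf ++ ts)).2) := by
  intro ts
  induction ts with
  | nil =>
    intro res buf hb
    simp only [List.foldl_nil, List.append_nil]
    rw [emitRem, if_pos hb]
    simp
  | cons t ts ih =>
    intro res buf hb
    rw [List.foldl_cons]
    by_cases h : (buf ++ [t]).length = 25
    · rw [show stepB (res, buf) t = (res ++ [PySem.Str.join "," (buf ++ [t])], []) from by
        simp only [stepB, if_pos h]]
      rw [ih _ [] (by norm_num)]
      have hsplit : buf ++ t :: ts = (buf ++ [t]) ++ ts := by simp
      have hc : emitRem ((buf ++ [t]) ++ ts)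
          = (PySem.Str.join "," (buf ++ [t]) :: (emitRem ts).1, (emitRem ts).2) := by
        rw [emitRem]
        rw [if_neg (by simp at h ⊢; omega)]
        rw [← h, List.take_left, List.drop_left]
      rw [hsplit, hc]
      simp
    · rw [show stepB (res, buf) t = (res, buf ++ [t]) from by simp only [stepB, if_neg h]]
      rw [ih _ _ (by simp at h ⊢; omega)]
      simp

lemma emitRem_final : ∀ (k : Nat) (c : List String), c.length ≤ k → c ≠ [] →
    (if (emitRem c).2 ≠ [] ∨ (emitRem c).1 = [] then (emitRem c).1 ++ [PySem.Str.join "," (emitRem c).2] else (emitRem c).1)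
      = g25 c := by
  intro k
  induction k with
  | zero => intro c h hne; simp at h; simp [h] at hne
  | succ k ih =>
    intro c hlen hne
    by_cases h25 : c.length < 25
    · have h1 : emitRem c = ([], c) := by rw [emitRem, if_pos h25]
      rw [h1, g25, if_pos (by omega : c.length ≤ 25)]
      simp
    · have hrec : emitRem c = (PySem.Str.join "," (c.take 25) :: (emitRem (c.drop 25)).1, (emitRem (c.drop 25)).2) := by
        rw [emitRem, if_neg h25]
      by_cases heq : c.length = 25
      · have hd : c.drop 25 = [] := by
          apply List.eq_nil_of_length_eq_zero
          simp [heq]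
        have h1 : emitRem c = ([PySem.Str.join "," (c.take 25)], []) := by
          rw [hrec, hd, show emitRem ([] : List String) = ([], []) from by rw [emitRem]; simp]
        rw [h1, g25, if_pos (by omega : c.length ≤ 25), List.take_of_length_le (by omega)]
        simp
      · have hdne : c.drop 25 ≠ [] := by
          intro hnil
          have := congrArg List.length hnil
          simp at this; omega
        rcases hp : emitRem (c.drop 25) with ⟨e, r⟩
        rw [hp] at hrec
        have ihr := ih (c.drop 25) (by simp only [List.length_drop]; omega) hdne
        rw [hp] at ihr
        rw [hrec, g25, if_neg (by omega : ¬ c.length ≤ 25)]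
        by_cases hr : r = []
        · have hine : e ≠ [] := by
            by_cases hl : (c.drop 25).length < 25
            · exfalso
              rw [emitRem, if_pos hl] at hp
              have : r = c.drop 25 := (congrArg Prod.snd hp).symm
              exact hdne (this ▸ hr)
            · rw [emitRem, if_neg hl] at hp
              have he : e = PySem.Str.join "," ((c.drop 25).take 25) :: (emitRem ((c.drop 25).drop 25)).1 :=
                (congrArg Prod.fst hp).symm
              simp [he]
          simp only [hr] at ihr ⊢
          simp [hine] at ihr ⊢
          exact ihr
        · simp [hr] at ihr ⊢
          rw [← ihr]

lemma foldl_app {α β : Type} (h : α → β) :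
    ∀ (l : List α) (acc : List β),
      l.foldl (fun ids c => ids ++ [h c]) acc = acc ++ l.map h := by
  intro l
  induction l with
  | nil => simp
  | cons x xs ih => intro acc; simp [ih]

lemma slice_map_toStr (l : List Int) (u : Int) (hu : 0 ≤ u) :
    (PySem.List.slice l (some u) (some (u + 25))).map PySem.Int.toStr
      = PySem.List.slice (l.map PySem.Int.toStr) (some u) (some (u + 25)) := by
  rw [PySem.List.slice_toNat l hu (by omega),
      PySem.List.slice_toNat (l.map PySem.Int.toStr) hu (by omega)]
  simp

lemma chunk_ids_alt_emitRem (l : List Int) :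
    chunk_ids_alt l =
      (if (emitRem (l.map PySem.Int.toStr)).2 ≠ [] ∨ (emitRem (l.map PySem.Int.toStr)).1 = []
       then (emitRem (l.map PySem.Int.toStr)).1 ++ [PySem.Str.join "," (emitRem (l.map PySem.Int.toStr)).2]
       else (emitRem (l.map PySem.Int.toStr)).1) := by
  unfold chunk_ids_alt
  have hfun : (fun (st : List String × List String) (i : Int) =>
      let buf := st.2 ++ [PySem.Int.toStr i]
      if buf.length = 25 then (st.1 ++ [PySem.Str.join "," buf], []) else (st.1, buf))
      = fun st i => stepB st (PySem.Int.toStr i) := rfl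
  have key : List.foldl (fun st i => stepB st (PySem.Int.toStr i)) (([], []) : List String × List String) l
      = ((emitRem (l.map PySem.Int.toStr)).1, (emitRem (l.map PySem.Int.toStr)).2) := by
    rw [← List.foldl_map, foldB_inv (l.map PySem.Int.toStr) [] [] (by norm_num)]
    simp
  rw [hfun, key]

-- ===== VERDICT (by name: the statement is the Claim_ definition above) =====
theorem chunk_ids_spec : Claim_equal_chunk_ids := by
  intro l _
  unfold Spec_chunk_ids
  by_cases hnil : l = []
  · subst hnil; rfl
  · have hts : l.map PySem.Int.toStr ≠ [] := by simpa using hnil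
    rw [chunk_ids_alt_emitRem,
        emitRem_final (l.map PySem.Int.toStr).length (l.map PySem.Int.toStr) (le_refl _) hts]
    unfold chunk_ids
    by_cases h25 : 25 < l.length
    · rw [if_pos h25]
      rw [foldl_app, List.nil_append, List.map_map]
      have step : ∀ u ∈ PySem.List.pyRange 0 (l.length : Int) 25,
          ((fun chunk => PySem.Str.join "," (chunk.map PySem.Int.toStr)) ∘
            (fun uri => PySem.List.slice l (some uri) (some (uri + 25)))) u
          = (fun u => PySem.Str.join ","
              (PySem.List.slice (l.map PySem.Int.toStr) (some u) (some (u + 25)))) u := by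
        intro u hu
        have hu0 : 0 ≤ u := by
          have := (PySem.List.mem_pyRange_iff_of_pos (a := 0) (b := (l.length : Int)) (s := 25) (by norm_num) u).mp hu
          omega
        simp only [Function.comp]
        rw [slice_map_toStr l u hu0]
      rw [List.map_congr_left step,
          show ((l.length : Int)) = (((l.map PySem.Int.toStr).length : Nat) : Int) from by simp]
      exact mapForm_eq_g25 (l.map PySem.Int.toStr).length (l.map PySem.Int.toStr) (le_refl _) hts
    · rw [if_neg h25, g25, if_pos (by simpa using not_lt.mp h25)]
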